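-- pv_equiv track=rewrite | github.com/DPNT-Sourcecode/CHK-mszw01 | lib/solutions/checkout.py | check_and_apply_freedeals
-- ===== SOURCE A (Python) =====
-- FREEDEALS = {'E': [2, ['B', 1]], 'F': [3, ['F', 1]], 'N': [3, ['M', 1]],
--              'R': [3, ['Q', 1]], 'U': [4, ['U', 1]]}
--
-- def check_and_apply_freedeals(cart):
--
--     for item in FREEDEALS:
--         if item in cart and cart[item]>= FREEDEALS[item][0]:
--             num = cart[item]
--             while num >= FREEDEALS[item][0]:
--                 if FREEDEALS[item][1][0] in cart:
--                     cart[FREEDEALS[item][1][0]] -= FREEDEALS[item][1][1]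
--                 num -= FREEDEALS[item][0]
--     return cart
-- ===== SOURCE B (Python) =====
-- # B: apply each free-item deal in one step via integer division (count // threshold)
-- # instead of a while-loop; mutates cart in place and returns it, like A.
-- FREEDEALS = {'E': [2, ['B', 1]], 'F': [3, ['F', 1]], 'N': [3, ['M', 1]],
--              'R': [3, ['Q', 1]], 'U': [4, ['U', 1]]}
--
-- def check_and_apply_freedeals(cart):
--     for item, (threshold, (free, amount)) in FREEDEALS.items():
--         count = cart.get(item)
--         if count is not None and count >= threshold:
--             if free in cart:
--                 cart[free] -= (count // threshold) * amount
--     return cart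
-- ===== Notes on version B (the rewrite author's own statement) =====
-- stated objective: simpler
-- what changed: Replaces the per-deal while-loop that subtracts the free amount once per threshold-sized chunk with a single integer-division computation (count // threshold deals applied in one subtraction).
import Mathlib
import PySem

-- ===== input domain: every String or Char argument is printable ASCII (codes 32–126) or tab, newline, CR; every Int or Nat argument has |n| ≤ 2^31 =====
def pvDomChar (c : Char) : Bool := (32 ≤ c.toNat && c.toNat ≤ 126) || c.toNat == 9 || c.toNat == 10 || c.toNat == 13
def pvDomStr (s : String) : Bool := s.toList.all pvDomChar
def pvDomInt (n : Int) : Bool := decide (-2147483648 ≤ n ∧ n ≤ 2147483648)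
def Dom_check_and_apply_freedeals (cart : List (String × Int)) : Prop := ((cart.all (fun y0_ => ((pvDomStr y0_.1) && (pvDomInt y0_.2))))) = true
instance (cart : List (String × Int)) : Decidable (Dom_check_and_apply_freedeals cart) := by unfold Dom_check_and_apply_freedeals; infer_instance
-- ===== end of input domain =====

-- B replaces A's per-deal while-loop (one subtraction per threshold-sized chunk) by a single
-- integer-division subtraction per deal; both Pythons mutate the cart dict in place the same way,
-- the theorem is about the returned value.

-- FREEDEALS: (item, threshold, free item, free amount) — shared module constant of both Pythons
def pvFreedeals : List (String × Int × String × Int) :=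
  [("E", 2, "B", 1), ("F", 3, "F", 1), ("N", 3, "M", 1), ("R", 3, "Q", 1), ("U", 4, "U", 1)]

-- ===== PORT A =====
-- A's inner 'while num >= threshold' loop; fuel = num.toNat bounds the iteration count
-- (each pass lowers num by threshold ≥ 2, so num.toNat passes always suffice)
def pvWhileA (fuel : Nat) (num thresh : Int) (free : String) (amt : Int)
    (d : PySem.Dict String Int) : PySem.Dict String Int :=
  match fuel with
  | 0 => d
  | Nat.succ fuel =>
    if thresh ≤ num then
      pvWhileA fuel (num - thresh) thresh free amt
        (if d.contains free then d.modify free 0 (fun v => v - amt) else d)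
    else d

-- body of A's 'for item in FREEDEALS' loop
def pvStepA (d : PySem.Dict String Int) (deal : String × Int × String × Int) :
    PySem.Dict String Int :=
  if d.contains deal.1 && decide (deal.2.1 ≤ d.getD deal.1 0) then
    pvWhileA (d.getD deal.1 0).toNat (d.getD deal.1 0) deal.2.1 deal.2.2.1 deal.2.2.2 d
  else d

def check_and_apply_freedeals (cart : List (String × Int)) : List (String × Int) :=
  (pvFreedeals.foldl pvStepA (PySem.Dict.mk cart)).items

-- ===== PORT B =====
-- body of B's 'for item, (threshold, (free, amount)) in FREEDEALS.items()' loop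
def pvStepB (d : PySem.Dict String Int) (deal : String × Int × String × Int) :
    PySem.Dict String Int :=
  match d.get? deal.1 with
  | some count =>
    if deal.2.1 ≤ count then
      if d.contains deal.2.2.1 then
        d.modify deal.2.2.1 0 (fun v => v - (PySem.Int.floordiv count deal.2.1) * deal.2.2.2)
      else d
    else d
  | none => d

def check_and_apply_freedeals_alt (cart : List (String × Int)) : List (String × Int) :=
  (pvFreedeals.foldl pvStepB (PySem.Dict.mk cart)).items

-- ===== PRECONDITION & SPEC =====
def Spec_check_and_apply_freedeals (cart : List (String × Int)) (out : List (String × Int)) : Prop := out = check_and_apply_freedeals_alt cart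
instance (cart : List (String × Int)) (out : List (String × Int)) : Decidable (Spec_check_and_apply_freedeals cart out) := by unfold Spec_check_and_apply_freedeals; infer_instance

-- ===== CLAIM (what is proved, stated in full; the proofs are below) =====
def Claim_equal_check_and_apply_freedeals : Prop := ∀ (cart : List (String × Int)), Dom_check_and_apply_freedeals cart → Spec_check_and_apply_freedeals cart (check_and_apply_freedeals cart)

-- ===== LEMMAS AND PROOFS =====

-- two modifications of the same key compose
lemma pv_modify_modify (d : PySem.Dict String Int) (k : String) (f g : Int → Int) :
    (d.modify k 0 f).modify k 0 g = d.modify k 0 (fun v => g (f v)) := by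
  simp [PySem.Dict.modify, PySem.Dict.getD_insert_self, PySem.Dict.insert_insert_self]

lemma pvWhileA_lt (fuel : Nat) (num thresh : Int) (free : String) (amt : Int)
    (d : PySem.Dict String Int) (h : num < thresh) :
    pvWhileA fuel num thresh free amt d = d := by
  cases fuel <;> simp [pvWhileA, not_le.mpr h]

-- the while-loop subtracts (num / thresh) * amt from the free item's count
lemma pvWhileA_spec : ∀ (fuel : Nat) (num : Int), ∀ (thresh : Int) (free : String) (amt : Int)
    (d : PySem.Dict String Int), 2 ≤ thresh → thresh ≤ num → num.toNat ≤ fuel →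
    pvWhileA fuel num thresh free amt d =
      if d.contains free then d.modify free 0 (fun v => v - (num / thresh) * amt) else d := by
  intro fuel
  induction fuel with
  | zero => intro num thresh free amt d h2 hn hf; omega
  | succ fuel ih =>
    intro num thresh free amt d h2 hn hf
    have hq : num / thresh = (num - thresh) / thresh + 1 := by
      have h0 : thresh ≠ 0 := by omega
      have := Int.add_mul_ediv_right (num - thresh) 1 h0
      simpa [sub_add_cancel] using this
    simp only [pvWhileA, if_pos hn]
    by_cases hlt : num - thresh < thresh
    · -- last pass: (num - thresh) / thresh = 0, so num / thresh = 1
      have hz : (num - thresh) / thresh = 0 := Int.ediv_eq_zero_of_lt (by omega) hlt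
      rw [pvWhileA_lt _ _ _ _ _ _ hlt]
      by_cases hc : d.contains free
      · simp only [if_pos hc, hq, hz]
        congr 1; funext v; ring
      · simp [hc]
    · rw [not_lt] at hlt
      rw [ih (num - thresh) thresh free amt _ h2 hlt (by omega)]
      by_cases hc : d.contains free
      · simp only [if_pos hc,
          PySem.Dict.contains_modify (d := d) free free 0 (fun v => v - amt),
          BEq.rfl, Bool.true_or, if_pos]
        rw [pv_modify_modify, hq]
        congr 1; funext v; ring
      · simp [hc]

-- A's loop body equals B's loop body for every deal with threshold ≥ 2
lemma pvStep_eq (d : PySem.Dict String Int) (deal : String × Int × String × Int)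
    (h2 : 2 ≤ deal.2.1) : pvStepA d deal = pvStepB d deal := by
  obtain ⟨item, thresh, free, amt⟩ := deal
  simp only at h2
  unfold pvStepA pvStepB
  simp only
  cases hg : d.get? item with
  | none =>
    have hc : d.contains item = false := by
      rw [PySem.Dict.contains_eq_isSome_get?, hg]; rfl
    simp [hc]
  | some count =>
    have hc : d.contains item = true := by
      rw [PySem.Dict.contains_eq_isSome_get?, hg]; rfl
    have hgd : d.getD item 0 = count := PySem.Dict.getD_of_get?_eq_some d 0 hg
    by_cases hle : thresh ≤ count
    · rw [hc, hgd]
      simp only [Bool.true_and, decide_eq_true_eq, if_pos hle]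
      rw [pvWhileA_spec count.toNat count thresh free amt d h2 hle (le_refl _)]
      have hfd : PySem.Int.floordiv count thresh = count / thresh := by
        rw [PySem.Int.floordiv, Int.fdiv_eq_ediv]
        simp [show (0:Int) ≤ thresh by omega]
      rw [hfd]
    · simp [hc, hgd, hle]

lemma pv_foldl_eq : ∀ (l : List (String × Int × String × Int)),
    (∀ deal ∈ l, 2 ≤ deal.2.1) → ∀ d : PySem.Dict String Int,
    l.foldl pvStepA d = l.foldl pvStepB d := by
  intro l
  induction l with
  | nil => intro _ d; rfl
  | cons x xs ih =>
    intro h d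
    simp only [List.foldl_cons]
    rw [pvStep_eq d x (h x (List.mem_cons_self))]
    exact ih (fun deal hm => h deal (List.mem_cons_of_mem x hm)) _

-- ===== VERDICT (by name: the statement is the Claim_ definition above) =====
theorem check_and_apply_freedeals_spec : Claim_equal_check_and_apply_freedeals := by
  intro cart _
  unfold Spec_check_and_apply_freedeals check_and_apply_freedeals check_and_apply_freedeals_alt
  rw [pv_foldl_eq pvFreedeals (by decide)]
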